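-- pv_equiv track=rewrite | github.com/IGTA-Tech/dc-federal-court-drafter | tools/pdf_analyzer.py | _get_primary_font
-- ===== SOURCE A (Python) =====
-- from typing import Optional
--
-- def _get_primary_font(fonts: list[str]) -> Optional[str]:
--     """Determine the primary font (likely body text font)."""
--     # Look for Times New Roman variants
--     for font in fonts:
--         if "times" in font.lower():
--             return "Times New Roman"
--
--     # Return first non-symbol font
--     for font in fonts:
--         if not any(x in font.lower() for x in ["symbol", "zapf", "wingding"]):
--             return font
--
--     return fonts[0] if fonts else None
-- ===== SOURCE B (Python) =====
-- from typing import Optional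
--
-- def _get_primary_font(fonts: list[str]) -> Optional[str]:
--     """Single fused pass: track has_times and the first non-symbol font."""
--     has_times = False
--     first_non_symbol = None
--     for font in fonts:
--         f = font.lower()
--         if "times" in f:
--             has_times = True
--         if first_non_symbol is None and "symbol" not in f and "zapf" not in f and "wingding" not in f:
--             first_non_symbol = font
--     if has_times:
--         return "Times New Roman"
--     if first_non_symbol is not None:
--         return first_non_symbol
--     return fonts[0] if fonts else None
-- ===== Notes on version B (the rewrite author's own statement) =====
-- stated objective: alternative
-- what changed: Replaced A's two sequential scans (one for Times, one for the first non-symbol font) by a single fused pass maintaining a has_times flag and the first non-symbol font seen.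
import Mathlib
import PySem

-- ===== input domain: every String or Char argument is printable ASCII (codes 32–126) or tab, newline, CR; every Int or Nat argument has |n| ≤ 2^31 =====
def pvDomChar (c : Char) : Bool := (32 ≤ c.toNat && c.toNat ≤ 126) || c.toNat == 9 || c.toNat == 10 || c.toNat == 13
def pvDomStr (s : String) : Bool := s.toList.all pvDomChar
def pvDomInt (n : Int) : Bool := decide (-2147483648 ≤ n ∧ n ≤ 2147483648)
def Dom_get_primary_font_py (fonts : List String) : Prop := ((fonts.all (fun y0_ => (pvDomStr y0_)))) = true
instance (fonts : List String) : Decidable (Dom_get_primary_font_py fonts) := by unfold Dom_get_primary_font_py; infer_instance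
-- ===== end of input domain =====

-- B fuses A's two sequential scans into one pass tracking a has_times flag and the
-- first non-symbol font; same O(n) cost, different decomposition (objective: alternative).

-- ===== PORT A =====
-- first loop: return "Times New Roman" on the first font containing "times"
def pvALoop1 : List String → Option String
  | [] => none
  | font :: rest =>
    if PySem.Str.isIn "times" (PySem.Str.lower font) then some "Times New Roman"
    else pvALoop1 rest

-- second loop: return the first font containing none of the symbol markers
def pvALoop2 : List String → Option String
  | [] => none
  | font :: rest =>
    if !(["symbol", "zapf", "wingding"].any (fun x => PySem.Str.isIn x (PySem.Str.lower font))) then some font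
    else pvALoop2 rest

def get_primary_font_py (fonts : List String) : Option String :=
  match pvALoop1 fonts with
  | some r => some r
  | none =>
    match pvALoop2 fonts with
    | some r => some r
    | none => match fonts with
      | [] => none           -- fonts[0] if fonts else None
      | f :: _ => some f

-- ===== PORT B =====
-- one fused pass: state = (has_times, first_non_symbol)
def pvBStep (st : Bool × Option String) (font : String) : Bool × Option String :=
  let f := PySem.Str.lower font
  let ht := if PySem.Str.isIn "times" f then true else st.1
  let fns := if st.2.isNone && !(PySem.Str.isIn "symbol" f) && !(PySem.Str.isIn "zapf" f)
                && !(PySem.Str.isIn "wingding" f) then some font else st.2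
  (ht, fns)

def get_primary_font_py_alt (fonts : List String) : Option String :=
  let st := fonts.foldl pvBStep (false, none)
  if st.1 then some "Times New Roman"
  else
    match st.2 with
    | some r => some r
    | none => match fonts with
      | [] => none
      | f :: _ => some f

-- ===== PRECONDITION & SPEC =====
def Spec_get_primary_font_py (fonts : List String) (out : Option String) : Prop := out = get_primary_font_py_alt fonts
instance (fonts : List String) (out : Option String) : Decidable (Spec_get_primary_font_py fonts out) := by unfold Spec_get_primary_font_py; infer_instance

-- ===== CLAIM (what is proved, stated in full; the proofs are below) =====
def Claim_equal_get_primary_font_py : Prop := ∀ (fonts : List String), Dom_get_primary_font_py fonts → Spec_get_primary_font_py fonts (get_primary_font_py fonts)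

-- ===== LEMMAS AND PROOFS =====

theorem pvIfOr (c r : Bool) (x : Option String) :
    (if c = true then x else if r = true then x else none) = if (c || r) = true then x else none := by
  cases c <;> cases r <;> simp

theorem pvALoop1_eq (l : List String) :
    pvALoop1 l = if l.any (fun f => PySem.Str.isIn "times" (PySem.Str.lower f)) then some "Times New Roman" else none := by
  induction l with
  | nil => rfl
  | cons f rest ih =>
    simp only [pvALoop1, List.any_cons, ih]
    exact pvIfOr _ _ _

theorem pvBStep_foldl (l : List String) (b : Bool) (o : Option String) :
    l.foldl pvBStep (b, o) =
      (b || l.any (fun f => PySem.Str.isIn "times" (PySem.Str.lower f)), o.or (pvALoop2 l)) := by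
  induction l generalizing b o with
  | nil => cases o <;> simp [pvALoop2]
  | cons f rest ih =>
    simp only [List.foldl_cons, List.any_cons, pvBStep, pvALoop2, ih, Prod.mk.injEq]
    refine ⟨?_, ?_⟩
    · cases hc : PySem.Str.isIn "times" (PySem.Str.lower f) <;> cases b <;> simp
    · cases o with
      | some x => simp
      | none =>
        simp only [Option.isNone_none, Bool.true_and, List.any_cons, List.any_nil,
          Bool.or_false, Option.none_or]
        cases hs : PySem.Str.isIn "symbol" (PySem.Str.lower f) <;>
        cases hz : PySem.Str.isIn "zapf" (PySem.Str.lower f) <;>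
        cases hw : PySem.Str.isIn "wingding" (PySem.Str.lower f) <;> simp

-- ===== VERDICT (by name: the statement is the Claim_ definition above) =====
theorem get_primary_font_py_spec : Claim_equal_get_primary_font_py := by
  intro fonts _
  unfold Spec_get_primary_font_py get_primary_font_py get_primary_font_py_alt
  rw [pvBStep_foldl, pvALoop1_eq]
  cases h : fonts.any (fun f => PySem.Str.isIn "times" (PySem.Str.lower f)) <;>
    cases hp : pvALoop2 fonts <;> simp
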